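-- pv_equiv track=rewrite | github.com/Malkovsky/semantic-terminal | semantic_terminal/wrapper_setup.py | _strip_managed_block
-- ===== SOURCE A (Python) =====
-- START_MARKER = "# >>> semantic-terminal wrappers >>>"
--
-- END_MARKER = "# <<< semantic-terminal wrappers <<<"
--
-- def _strip_managed_block(lines: list[str]) -> list[str]:
--     cleaned: list[str] = []
--     index = 0
--
--     while index < len(lines):
--         if lines[index].strip() == START_MARKER:
--             end_index = index + 1
--             while end_index < len(lines) and lines[end_index].strip() != END_MARKER:
--                 end_index += 1
--
--             if end_index >= len(lines):
--                 cleaned.append(lines[index])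
--                 index += 1
--                 continue
--
--             index = end_index + 1
--             continue
--         cleaned.append(lines[index])
--         index += 1
--
--     return cleaned
-- ===== SOURCE B (Python) =====
-- START_MARKER = "# >>> semantic-terminal wrappers >>>"
-- END_MARKER = "# <<< semantic-terminal wrappers <<<"
--
-- def _strip_managed_block(lines: list[str]) -> list[str]:
--     # Precompute all END-marker positions once; a single forward pass with a
--     # monotone pointer then jumps from a START marker past the next END marker.
--     ends = []
--     for j, line in enumerate(lines):
--         if line.strip() == END_MARKER:
--             ends.append(j)
--     cleaned = []
--     i = 0
--     k = 0
--     while i < len(lines):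
--         while k < len(ends) and ends[k] <= i:
--             k += 1
--         if k < len(ends) and lines[i].strip() == START_MARKER:
--             i = ends[k] + 1
--         else:
--             cleaned.append(lines[i])
--             i += 1
--     return cleaned
-- ===== Notes on version B (the rewrite author's own statement) =====
-- stated objective: alternative
-- what changed: B precomputes all END-marker positions in one initial pass and then a single forward pass with a monotone pointer jumps from each START marker straight past the next END marker, replacing A's repeated inner scan for the END marker.
import Mathlib
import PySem

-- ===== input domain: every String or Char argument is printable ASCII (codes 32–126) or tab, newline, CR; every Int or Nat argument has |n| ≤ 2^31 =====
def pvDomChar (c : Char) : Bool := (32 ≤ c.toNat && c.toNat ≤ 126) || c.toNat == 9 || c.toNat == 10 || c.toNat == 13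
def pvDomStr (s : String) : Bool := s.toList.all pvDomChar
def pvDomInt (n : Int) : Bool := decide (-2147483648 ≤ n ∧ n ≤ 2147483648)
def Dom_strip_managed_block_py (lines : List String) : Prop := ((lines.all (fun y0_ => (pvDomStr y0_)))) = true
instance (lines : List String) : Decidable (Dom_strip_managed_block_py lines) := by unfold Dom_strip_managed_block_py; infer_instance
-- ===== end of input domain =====

-- B replaces A's per-START inner scan by a precomputed list of END positions and one forward pass with a monotone pointer (alternative algorithm; not measured faster).

def pvStartMarker : String := "# >>> semantic-terminal wrappers >>>"
def pvEndMarker : String := "# <<< semantic-terminal wrappers <<<"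

-- ===== PORT A =====
-- inner while: first index ≥ j whose stripped line is the END marker, else lines.length
def pvFindEnd (lines : List String) (j : Nat) : Nat :=
  if h : j < lines.length then
    if PySem.Str.strip lines[j] = pvEndMarker then j else pvFindEnd lines (j + 1)
  else j
termination_by lines.length - j

theorem pvFindEnd_ge (lines : List String) (j : Nat) : j ≤ pvFindEnd lines j := by
  unfold pvFindEnd
  split
  · split
    · omega
    · have := pvFindEnd_ge lines (j + 1)
      omega
  · omega
termination_by lines.length - j

def pvLoopA (lines : List String) (index : Nat) (cleaned : List String) : List String :=
  if h : index < lines.length then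
    if PySem.Str.strip lines[index] = pvStartMarker then
      let e := pvFindEnd lines (index + 1)
      if lines.length ≤ e then
        pvLoopA lines (index + 1) (cleaned ++ [lines[index]])
      else
        pvLoopA lines (e + 1) cleaned
    else
      pvLoopA lines (index + 1) (cleaned ++ [lines[index]])
  else cleaned
termination_by lines.length - index
decreasing_by
  · omega
  · have := pvFindEnd_ge lines (index + 1)
    omega
  · omega

def strip_managed_block_py (lines : List String) : List String :=
  pvLoopA lines 0 []

-- ===== PORT B =====
-- the 'for j, line in enumerate(lines): if line.strip() == END_MARKER: ends.append(j)' pass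
def pvEndIdxs (lines : List String) (j : Nat) : List Nat :=
  match lines with
  | [] => []
  | l :: rest =>
      if PySem.Str.strip l = pvEndMarker then j :: pvEndIdxs rest (j + 1)
      else pvEndIdxs rest (j + 1)

-- the 'while k < len(ends) and ends[k] <= i: k += 1' pointer advance (suffix view of the pointer)
def pvAdvance (ends : List Nat) (i : Nat) : List Nat :=
  match ends with
  | [] => []
  | e :: rest => if e ≤ i then pvAdvance rest i else e :: rest

theorem pvAdvance_head_gt (ends : List Nat) (i e : Nat) (rest : List Nat)
    (h : pvAdvance ends i = e :: rest) : i < e := by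
  induction ends with
  | nil => simp [pvAdvance] at h
  | cons a t ih =>
      by_cases ha : a ≤ i
      · exact ih (by simpa [pvAdvance, ha] using h)
      · simp [pvAdvance, ha] at h; omega

def pvLoopB (lines : List String) (i : Nat) (ends : List Nat) (cleaned : List String) : List String :=
  if h : i < lines.length then
    match he : pvAdvance ends i with
    | e :: rest =>
        if PySem.Str.strip lines[i] = pvStartMarker then
          pvLoopB lines (e + 1) (e :: rest) cleaned
        else
          pvLoopB lines (i + 1) (e :: rest) (cleaned ++ [lines[i]])
    | [] => pvLoopB lines (i + 1) [] (cleaned ++ [lines[i]])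
  else cleaned
termination_by lines.length - i
decreasing_by
  · have := pvAdvance_head_gt ends i e rest he; omega
  · omega
  · omega

def strip_managed_block_py_alt (lines : List String) : List String :=
  pvLoopB lines 0 (pvEndIdxs lines 0) []

-- ===== PRECONDITION & SPEC =====
def Spec_strip_managed_block_py (lines : List String) (out : List String) : Prop := out = strip_managed_block_py_alt lines
instance (lines : List String) (out : List String) : Decidable (Spec_strip_managed_block_py lines out) := by unfold Spec_strip_managed_block_py; infer_instance

-- ===== CLAIM (what is proved, stated in full; the proofs are below) =====
def Claim_equal_strip_managed_block_py : Prop := ∀ (lines : List String), Dom_strip_managed_block_py lines → Spec_strip_managed_block_py lines (strip_managed_block_py lines)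

-- ===== LEMMAS AND PROOFS =====

theorem pvAdvance_suffix (ends : List Nat) (i : Nat) : (pvAdvance ends i).IsSuffix ends := by
  induction ends with
  | nil => simp [pvAdvance]
  | cons a t ih =>
      by_cases ha : a ≤ i
      · simpa [pvAdvance, ha] using ih.trans (List.suffix_cons a t)
      · simp [pvAdvance, ha]

theorem pvAdvance_mem (ends : List Nat) (i j : Nat) (hj : j ∈ ends) (hij : i < j) :
    j ∈ pvAdvance ends i := by
  induction ends with
  | nil => simp at hj
  | cons a t ih =>
      by_cases ha : a ≤ i
      · rcases List.mem_cons.mp hj with rfl | hj'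
        · omega
        · simpa [pvAdvance, ha] using ih hj'
      · simpa [pvAdvance, ha] using hj

theorem pvAdvance_nil (ends : List Nat) (i : Nat) (h : pvAdvance ends i = [])
    (j : Nat) (hj : j ∈ ends) : j ≤ i := by
  by_contra hc
  have := pvAdvance_mem ends i j hj (by omega)
  simp [h] at this

theorem pvFindEnd_eq (lines : List String) (j e : Nat) (hje : j ≤ e) (he : e < lines.length)
    (hE : PySem.Str.strip (lines.getD e "") = pvEndMarker)
    (hNo : ∀ k, j ≤ k → k < e → PySem.Str.strip (lines.getD k "") ≠ pvEndMarker) :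
    pvFindEnd lines j = e := by
  have hj : j < lines.length := by omega
  rw [pvFindEnd, dif_pos hj]
  by_cases hjE : PySem.Str.strip lines[j] = pvEndMarker
  · rw [if_pos hjE]
    by_contra hne
    exact hNo j le_rfl (by omega) (by rwa [List.getD_eq_getElem _ _ hj])
  · rw [if_neg hjE]
    have hjne : j ≠ e := by
      intro hcontra; subst hcontra
      exact hjE (by rwa [List.getD_eq_getElem _ _ hj] at hE)
    exact pvFindEnd_eq lines (j + 1) e (by omega) he hE (fun k hk1 hk2 => hNo k (by omega) hk2)
termination_by e - j

theorem pvFindEnd_ge_length (lines : List String) (j : Nat)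
    (hNo : ∀ k, j ≤ k → k < lines.length → PySem.Str.strip (lines.getD k "") ≠ pvEndMarker) :
    lines.length ≤ pvFindEnd lines j := by
  rw [pvFindEnd]
  by_cases hj : j < lines.length
  · rw [dif_pos hj]
    have hjE : ¬ PySem.Str.strip lines[j] = pvEndMarker := by
      have := hNo j le_rfl hj
      rwa [List.getD_eq_getElem _ _ hj] at this
    rw [if_neg hjE]
    exact pvFindEnd_ge_length lines (j + 1) (fun k hk1 hk2 => hNo k (by omega) hk2)
  · rw [dif_neg hj]; omega
termination_by lines.length - j

theorem pvEndIdxs_mem (lines : List String) (s j : Nat) (h : j ∈ pvEndIdxs lines s) :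
    s ≤ j ∧ j - s < lines.length ∧ PySem.Str.strip (lines.getD (j - s) "") = pvEndMarker := by
  induction lines generalizing s with
  | nil => simp [pvEndIdxs] at h
  | cons l rest ih =>
      by_cases hl : PySem.Str.strip l = pvEndMarker
      · rw [pvEndIdxs, if_pos hl] at h
        rcases List.mem_cons.mp h with rfl | h'
        · simp [hl]
        · have ⟨h1, h2, h3⟩ := ih (s + 1) h'
          refine ⟨by omega, by simp; omega, ?_⟩
          have : j - s = (j - (s + 1)) + 1 := by omega
          rw [this, List.getD_cons_succ]
          exact h3
      · rw [pvEndIdxs, if_neg hl] at h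
        have ⟨h1, h2, h3⟩ := ih (s + 1) h
        refine ⟨by omega, by simp; omega, ?_⟩
        have : j - s = (j - (s + 1)) + 1 := by omega
        rw [this, List.getD_cons_succ]
        exact h3

theorem pvEndIdxs_complete (lines : List String) (s k : Nat) (hk : k < lines.length)
    (hE : PySem.Str.strip (lines.getD k "") = pvEndMarker) : (s + k) ∈ pvEndIdxs lines s := by
  induction lines generalizing s k with
  | nil => simp at hk
  | cons l rest ih =>
      cases k with
      | zero =>
          simp at hE
          simp [pvEndIdxs, hE]
      | succ k' =>
          rw [List.getD_cons_succ] at hE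
          have h' := ih (s + 1) k' (by simpa using Nat.lt_of_succ_lt_succ (by simpa using hk)) hE
          have heq : s + (k' + 1) = (s + 1) + k' := by omega
          rw [pvEndIdxs]
          by_cases hl : PySem.Str.strip l = pvEndMarker
          · rw [if_pos hl]; exact List.mem_cons_of_mem _ (heq ▸ h')
          · rw [if_neg hl]; exact heq ▸ h'

theorem pvEndIdxs_pairwise (lines : List String) (s : Nat) :
    (pvEndIdxs lines s).Pairwise (· < ·) := by
  induction lines generalizing s with
  | nil => simp [pvEndIdxs]
  | cons l rest ih =>
      rw [pvEndIdxs]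
      by_cases hl : PySem.Str.strip l = pvEndMarker
      · rw [if_pos hl]
        refine List.pairwise_cons.mpr ⟨fun j hj => ?_, ih (s + 1)⟩
        have := pvEndIdxs_mem rest (s + 1) j hj
        omega
      · rw [if_neg hl]; exact ih (s + 1)

theorem pvLoopB_cons (lines : List String) (i : Nat) (ends : List Nat) (cleaned : List String)
    (e : Nat) (rest : List Nat) (h : i < lines.length) (hA : pvAdvance ends i = e :: rest) :
    pvLoopB lines i ends cleaned =
      if PySem.Str.strip lines[i] = pvStartMarker then
        pvLoopB lines (e + 1) (e :: rest) cleaned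
      else
        pvLoopB lines (i + 1) (e :: rest) (cleaned ++ [lines[i]]) := by
  rw [pvLoopB, dif_pos h]
  split
  · next heq => rw [hA] at heq; cases heq; rfl
  · next heq => rw [hA] at heq; cases heq

theorem pvLoopB_nil (lines : List String) (i : Nat) (ends : List Nat) (cleaned : List String)
    (h : i < lines.length) (hA : pvAdvance ends i = []) :
    pvLoopB lines i ends cleaned = pvLoopB lines (i + 1) [] (cleaned ++ [lines[i]]) := by
  rw [pvLoopB, dif_pos h]
  split
  · next heq => rw [hA] at heq; cases heq
  · rfl

theorem pv_loop_eq (lines : List String) (i : Nat) (ends : List Nat) (cleaned : List String)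
    (hpw : ends.Pairwise (· < ·))
    (hmem : ∀ e ∈ ends, e < lines.length ∧ PySem.Str.strip (lines.getD e "") = pvEndMarker)
    (hcomp : ∀ j, i < j → j < lines.length → PySem.Str.strip (lines.getD j "") = pvEndMarker → j ∈ ends) :
    pvLoopA lines i cleaned = pvLoopB lines i ends cleaned := by
  by_cases h : i < lines.length
  · have hsuf := pvAdvance_suffix ends i
    cases hA : pvAdvance ends i with
    | cons e rest =>
      rw [pvLoopB_cons lines i ends cleaned e rest h hA]
      -- e is the first END index after i
      have hein : e ∈ ends := hsuf.subset (by simp [hA])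
      have hepw : (e :: rest).Pairwise (· < ·) := hA ▸ hpw.sublist hsuf.sublist
      have hie : i < e := pvAdvance_head_gt ends i e rest hA
      have ⟨helen, heE⟩ := hmem e hein
      have hNo : ∀ k, i + 1 ≤ k → k < e → PySem.Str.strip (lines.getD k "") ≠ pvEndMarker := by
        intro k hk1 hk2 hkE
        have hkends := hcomp k (by omega) (by omega) hkE
        have hkadv : k ∈ e :: rest := hA ▸ pvAdvance_mem ends i k hkends (by omega)
        rcases List.mem_cons.mp hkadv with rfl | h'
        · omega
        · have := (List.pairwise_cons.mp hepw).1 k h'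
          omega
      have hfe : pvFindEnd lines (i + 1) = e := pvFindEnd_eq lines (i + 1) e (by omega) helen heE hNo
      by_cases hs : PySem.Str.strip lines[i] = pvStartMarker
      · rw [pvLoopA]
        simp only [dif_pos h, if_pos hs, hfe]
        rw [if_neg (by omega : ¬ lines.length ≤ e)]
        exact pv_loop_eq lines (e + 1) (e :: rest) cleaned hepw
          (fun x hx => hmem x (hsuf.subset (hA ▸ hx)))
          (fun j hj1 hj2 hjE => hA ▸ pvAdvance_mem ends i j (hcomp j (by omega) hj2 hjE) (by omega))
      · rw [pvLoopA]
        simp only [dif_pos h, if_neg hs]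
        exact pv_loop_eq lines (i + 1) (e :: rest) (cleaned ++ [lines[i]]) hepw
          (fun x hx => hmem x (hsuf.subset (hA ▸ hx)))
          (fun j hj1 hj2 hjE => hA ▸ pvAdvance_mem ends i j (hcomp j (by omega) hj2 hjE) (by omega))
    | nil =>
      rw [pvLoopB_nil lines i ends cleaned h hA]
      -- advance empty: no END marker after i at all
      have hNo : ∀ k, i + 1 ≤ k → k < lines.length → PySem.Str.strip (lines.getD k "") ≠ pvEndMarker := by
        intro k hk1 hk2 hkE
        have := pvAdvance_nil ends i hA k (hcomp k (by omega) hk2 hkE)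
        omega
      have hfe : lines.length ≤ pvFindEnd lines (i + 1) := pvFindEnd_ge_length lines (i + 1) hNo
      have hnext := pv_loop_eq lines (i + 1) [] (cleaned ++ [lines[i]]) (by simp)
        (by simp)
        (fun j hj1 hj2 hjE => by
          have := pvAdvance_nil ends i hA j (hcomp j (by omega) hj2 hjE); omega)
      by_cases hs : PySem.Str.strip lines[i] = pvStartMarker
      · rw [pvLoopA]
        simp only [dif_pos h, if_pos hs]
        rw [if_pos hfe]
        exact hnext
      · rw [pvLoopA]
        simp only [dif_pos h, if_neg hs]
        exact hnext
  · rw [pvLoopA, pvLoopB, dif_neg h, dif_neg h]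
termination_by lines.length - i
decreasing_by
  all_goals omega

-- ===== VERDICT (by name: the statement is the Claim_ definition above) =====
theorem strip_managed_block_py_spec : Claim_equal_strip_managed_block_py := by
  intro lines _
  unfold Spec_strip_managed_block_py strip_managed_block_py strip_managed_block_py_alt
  exact pv_loop_eq lines 0 (pvEndIdxs lines 0) [] (pvEndIdxs_pairwise lines 0)
    (fun e he => by simpa using pvEndIdxs_mem lines 0 e he)
    (fun j hj1 hj2 hjE => by simpa using pvEndIdxs_complete lines 0 j hj2 hjE)
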